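-- pv_equiv track=rewrite | github.com/Unicorn-Dynamics/reservoirpyml | reservoirpy/cognitive/tensor_fragment.py | _fibonacci_context
-- ===== SOURCE A (Python) =====
-- def _fibonacci_context(span: int) -> int:
--     """Encode context span using Fibonacci sequence for temporal dynamics."""
--     if span <= 0:
--         return 1
--     if span == 1:
--         return 1
--
--     # Generate Fibonacci number for context encoding
--     a, b = 1, 1
--     for _ in range(span - 1):
--         a, b = b, a + b
--     return min(b, 1000)  # Cap at reasonable size
-- ===== SOURCE B (Python) =====
-- # Capped Fibonacci values F(span+1) for span = 2..15; beyond that the cap of 1000 applies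
-- # (F(17) = 1597 > 1000 and the sequence is increasing).
-- _FIB_CAPPED = (2, 3, 5, 8, 13, 21, 34, 55, 89, 144, 233, 377, 610, 987)
--
-- def _fibonacci_context(span: int) -> int:
--     if span <= 1:
--         return 1
--     if span >= 16:
--         return 1000
--     return _FIB_CAPPED[span - 2]
-- ===== Notes on version B (the rewrite author's own statement) =====
-- stated objective: faster
-- what changed: Replaced the O(span) Fibonacci loop with an O(1) lookup: since the result is capped at 1000, only spans 2..15 yield distinct values (a 14-entry table) and every span >= 16 returns 1000.
import Mathlib
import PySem

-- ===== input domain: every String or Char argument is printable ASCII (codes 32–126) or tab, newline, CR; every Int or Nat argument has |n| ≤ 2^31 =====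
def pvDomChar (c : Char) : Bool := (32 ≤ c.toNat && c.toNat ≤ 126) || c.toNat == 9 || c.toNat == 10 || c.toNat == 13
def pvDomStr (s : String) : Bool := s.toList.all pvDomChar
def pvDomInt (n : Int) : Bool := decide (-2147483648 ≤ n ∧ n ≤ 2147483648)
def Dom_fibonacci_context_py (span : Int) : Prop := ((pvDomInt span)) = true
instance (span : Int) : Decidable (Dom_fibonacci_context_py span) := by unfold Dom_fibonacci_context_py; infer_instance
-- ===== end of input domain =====

-- B replaces A's O(span) Fibonacci loop by an O(1) 14-entry table plus the saturated cap (faster).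

-- ===== PORT A =====
def fibonacci_context_py (span : Int) : Int :=
  if span ≤ 0 then 1
  else if span = 1 then 1
  else
    -- a, b = 1, 1; for _ in range(span - 1): a, b = b, a + b
    let p := (List.range (span - 1).toNat).foldl (fun (ab : Int × Int) _ => (ab.2, ab.1 + ab.2)) (1, 1)
    min p.2 1000

-- ===== PORT B =====
def pvFibCapped : List Int := [2, 3, 5, 8, 13, 21, 34, 55, 89, 144, 233, 377, 610, 987]

def fibonacci_context_py_alt (span : Int) : Int :=
  if span ≤ 1 then 1
  else if 16 ≤ span then 1000
  else (PySem.List.pyGet? pvFibCapped (span - 2)).getD 0  -- index 0..13, always in range in this branch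

-- ===== PRECONDITION & SPEC =====
def Spec_fibonacci_context_py (span : Int) (out : Int) : Prop := out = fibonacci_context_py_alt span
instance (span : Int) (out : Int) : Decidable (Spec_fibonacci_context_py span out) := by unfold Spec_fibonacci_context_py; infer_instance

-- ===== CLAIM (what is proved, stated in full; the proofs are below) =====
def Claim_equal_fibonacci_context_py : Prop := ∀ (span : Int), Dom_fibonacci_context_py span → Spec_fibonacci_context_py span (fibonacci_context_py span)

-- ===== LEMMAS AND PROOFS =====

def pvFibPair : Nat → Int × Int
  | 0 => (1, 1)
  | n + 1 => ((pvFibPair n).2, (pvFibPair n).1 + (pvFibPair n).2)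

theorem pvFoldl_range_eq (n : Nat) :
    (List.range n).foldl (fun (ab : Int × Int) _ => (ab.2, ab.1 + ab.2)) (1, 1) = pvFibPair n := by
  induction n with
  | zero => rfl
  | succ n ih => rw [List.range_succ, List.foldl_append, ih]; rfl

theorem pvFibPair_pos (n : Nat) : 1 ≤ (pvFibPair n).1 ∧ (pvFibPair n).1 ≤ (pvFibPair n).2 := by
  induction n with
  | zero => simp [pvFibPair]
  | succ n ih => simp only [pvFibPair]; omega

theorem pvFibPair_big (n : Nat) (h : 15 ≤ n) : 1000 ≤ (pvFibPair n).2 := by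
  induction n with
  | zero => omega
  | succ n ih =>
    rcases Nat.lt_or_ge n 15 with h15 | h15
    · have : n = 14 := by omega
      subst this; decide
    · have h1 := pvFibPair_pos n
      simp only [pvFibPair]
      have := ih h15
      omega

-- ===== VERDICT (by name: the statement is the Claim_ definition above) =====
theorem fibonacci_context_py_spec : Claim_equal_fibonacci_context_py := by
  intro span _
  unfold Spec_fibonacci_context_py
  by_cases h1 : span ≤ 1
  · unfold fibonacci_context_py fibonacci_context_py_alt
    by_cases h0 : span ≤ 0
    · simp [h0, h1]
    · have : span = 1 := by omega
      subst this; simp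
  · by_cases h16 : 16 ≤ span
    · unfold fibonacci_context_py fibonacci_context_py_alt
      have hn0 : ¬ span ≤ 0 := by omega
      have hn1 : ¬ span = 1 := by omega
      simp only [hn0, hn1, h1, h16, if_false, if_true]
      rw [pvFoldl_range_eq]
      have hge : 15 ≤ (span - 1).toNat := by omega
      have := pvFibPair_big _ hge
      omega
    · -- 2 ≤ span ≤ 15: finite check
      have hlo : 2 ≤ span := by omega
      have hhi : span ≤ 15 := by omega
      interval_cases span <;> decide
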